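-- pv_equiv track=rewrite | github.com/dajacoding/py_puzzle_solver | pp_precalc_print.py | vektorEinkuerzen
-- ===== SOURCE A (Python) =====
-- def vektorEinkuerzen(vektor):
--     temp = sorted([v for v in vektor if v != 0])
--     for e, u in enumerate(temp):
--         i = e + 1 if e + 1 < len(temp) else 0
--         v = temp[i]
--         mk = moeglicheKombinationen(u, v)
--         if (u, v) != mk:
--             temp[e] = mk
--             del temp[i]
--             if len(temp) > 1:
--                 temp = vektorEinkuerzen(temp)
--                 break
--             if len(temp) == 1:
--                 return temp
--     if len(temp) == 0:
--         return [0]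
--     return temp
--
-- def moeglicheKombinationen(a, b):
--     match sorted((a, b)):
--         case (1, 4):
--             return 0
--         case (2, 5):
--             return 0
--         case (3, 6):
--             return 0
--         case (1, 3):
--             return 2
--         case (2, 4):
--             return 3
--         case (3, 5):
--             return 4
--         case (4, 6):
--             return 5
--         case (1, 5):
--             return 6
--         case (2, 6):
--             return 1
--         case _:
--             return a, b
-- ===== SOURCE B (Python) =====
-- def moeglicheKombinationen(a, b):
--     match sorted((a, b)):
--         case (1, 4):
--             return 0
--         case (2, 5):
--             return 0
--         case (3, 6):
--             return 0
--         case (1, 3):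
--             return 2
--         case (2, 4):
--             return 3
--         case (3, 5):
--             return 4
--         case (4, 6):
--             return 5
--         case (1, 5):
--             return 6
--         case (2, 6):
--             return 1
--         case _:
--             return a, b
--
--
-- def vektorEinkuerzen(vektor):
--     temp = sorted(v for v in vektor if v != 0)
--     while True:
--         merged = None
--         for e, (u, v) in enumerate(zip(temp, temp[1:] + temp[:1])):
--             mk = moeglicheKombinationen(u, v)
--             if (u, v) != mk:
--                 merged = (e, mk)
--                 break
--         if merged is None:
--             break
--         e, mk = merged
--         rest = temp[:e] + temp[e + 2:] if e + 1 < len(temp) else temp[1:e]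
--         temp = sorted(x for x in [mk] + rest if x != 0)
--     return temp if temp else [0]
-- ===== Notes on version B (the rewrite author's own statement) =====
-- stated objective: alternative
-- what changed: Replaces the recursive restart-from-scratch with an explicit iterative while-loop: each pass scans enumerate(zip(temp, temp[1:]+temp[:1])) for the first combinable cyclic-adjacent pair, rebuilds the list from slices around the merge point instead of in-place set/del, and re-filters/re-sorts before the next pass.
import Mathlib
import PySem

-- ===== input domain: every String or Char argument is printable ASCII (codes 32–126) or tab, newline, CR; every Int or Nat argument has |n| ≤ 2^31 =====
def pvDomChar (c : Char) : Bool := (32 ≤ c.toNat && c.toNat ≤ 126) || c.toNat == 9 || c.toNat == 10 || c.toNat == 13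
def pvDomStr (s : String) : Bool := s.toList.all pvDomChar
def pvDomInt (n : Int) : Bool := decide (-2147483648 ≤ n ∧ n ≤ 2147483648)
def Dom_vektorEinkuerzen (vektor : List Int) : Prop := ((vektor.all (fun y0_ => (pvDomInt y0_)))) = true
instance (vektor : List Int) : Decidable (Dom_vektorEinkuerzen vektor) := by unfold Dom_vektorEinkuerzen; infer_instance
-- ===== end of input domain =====

-- B replaces A's recursive restart with an explicit iterative loop scanning zipped cyclic-adjacent
-- pairs and rebuilding the list from slices (alternative decomposition; same exact return value).

-- ===== PORT A =====
-- Python's moeglicheKombinationen returns an int on the nine listed pairs and the tuple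
-- (a, b) otherwise; the tuple case always equals the argument pair (u, v), so the caller's
-- test '(u, v) != mk' fires exactly when a case matched — ported as Option Int, none = tuple.
def moeglicheKombinationen (a b : Int) : Option Int :=
  let lo := if a ≤ b then a else b   -- sorted((a, b))
  let hi := if a ≤ b then b else a
  if lo = 1 ∧ hi = 4 then some 0
  else if lo = 2 ∧ hi = 5 then some 0
  else if lo = 3 ∧ hi = 6 then some 0
  else if lo = 1 ∧ hi = 3 then some 2
  else if lo = 2 ∧ hi = 4 then some 3
  else if lo = 3 ∧ hi = 5 then some 4
  else if lo = 4 ∧ hi = 6 then some 5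
  else if lo = 1 ∧ hi = 5 then some 6
  else if lo = 2 ∧ hi = 6 then some 1
  else none

-- A's 'for e, u in enumerate(temp)' up to the first pair with (u, v) != mk:
-- recursion over the remaining elements carrying the running index e.
def scanA (temp : List Int) : List Int → Nat → Option (Nat × Int)
  | [], _ => none
  | u :: rest, e =>
    let i : Int := if e + 1 < temp.length then (e : Int) + 1 else 0
    match moeglicheKombinationen u (PySem.List.pyGetD temp i 0) with
    | some mk => some (e, mk)
    | none => scanA temp rest (e + 1)

-- A's recursion, totalised with fuel (each recursive call is on a strictly shorter list,
-- so fuel = vektor.length + 1 always suffices; the fuel-0 branch is unreachable).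
def goA : Nat → List Int → List Int
  | 0, vektor => vektor
  | fuel + 1, vektor =>
    let temp := PySem.List.sorted (vektor.filter (fun v => v != 0)) (fun x => x) false
    match scanA temp temp 0 with
    | none => if temp.length = 0 then [0] else temp
    | some (e, mk) =>
      let i := if e + 1 < temp.length then e + 1 else 0
      let t2 := (temp.set e mk).eraseIdx i   -- temp[e] = mk; del temp[i]
      if t2.length > 1 then
        let r := goA fuel t2                 -- temp = vektorEinkuerzen(temp); break
        if r.length = 0 then [0] else r
      else if t2.length = 1 then t2
      else [0]                               -- loop ends on the exhausted iterator; len == 0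

def vektorEinkuerzen (vektor : List Int) : List Int := goA (vektor.length + 1) vektor

-- ===== PORT B =====
-- B's 'for e, (u, v) in enumerate(zip(temp, temp[1:] + temp[:1]))' with break:
-- recursion over the zipped pair list carrying the running index e.
def scanB : List (Int × Int) → Nat → Option (Nat × Int)
  | [], _ => none
  | (u, v) :: rest, e =>
    match moeglicheKombinationen u v with
    | some mk => some (e, mk)
    | none => scanB rest (e + 1)

-- B's 'while True' loop, totalised with fuel (each merge shortens temp, so
-- vektor.length + 1 iterations always suffice).
def loopB : Nat → List Int → List Int
  | 0, temp => temp
  | fuel + 1, temp =>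
    match scanB (temp.zip (PySem.List.slice temp (some 1) none ++
                           PySem.List.slice temp none (some 1))) 0 with
    | none => temp
    | some (e, mk) =>
      let rest := if e + 1 < temp.length
        then PySem.List.slice temp none (some (e : Int)) ++
             PySem.List.slice temp (some ((e : Int) + 2)) none
        else PySem.List.slice temp (some 1) (some (e : Int))
      loopB fuel (PySem.List.sorted ((mk :: rest).filter (fun x => x != 0)) (fun x => x) false)

def vektorEinkuerzen_alt (vektor : List Int) : List Int :=
  let temp := PySem.List.sorted (vektor.filter (fun v => v != 0)) (fun x => x) false
  let r := loopB (vektor.length + 1) temp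
  if r = [] then [0] else r

-- ===== PRECONDITION & SPEC =====
def Spec_vektorEinkuerzen (vektor : List Int) (out : List Int) : Prop := out = vektorEinkuerzen_alt vektor
instance (vektor : List Int) (out : List Int) : Decidable (Spec_vektorEinkuerzen vektor out) := by unfold Spec_vektorEinkuerzen; infer_instance

-- ===== CLAIM (what is proved, stated in full; the proofs are below) =====
def Claim_equal_vektorEinkuerzen : Prop := ∀ (vektor : List Int), Dom_vektorEinkuerzen vektor → Spec_vektorEinkuerzen vektor (vektorEinkuerzen vektor)


-- ===== LEMMAS AND PROOFS =====

lemma mk_self (a : Int) : moeglicheKombinationen a a = none := by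
  unfold moeglicheKombinationen
  simp only [le_refl, if_true]
  split_ifs with h1 h2 h3 h4 h5 h6 h7 h8 h9 <;> first | rfl | omega

lemma zl_len (temp : List Int) : (temp.zip (temp.drop 1 ++ temp.take 1)).length = temp.length := by
  simp [List.length_zip]; omega

lemma partner_eq (temp : List Int) (e : Nat) (h : e < temp.length) :
    (temp.drop 1 ++ temp.take 1)[e]'(by simp; omega) =
      (if h1 : e + 1 < temp.length then temp[e+1] else temp[0]) := by
  by_cases h1 : e + 1 < temp.length
  · rw [List.getElem_append_left (by simp; omega)]
    simp [h1]
  · rw [List.getElem_append_right (by simp; omega)]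
    simp [h1]
    congr 1
    omega

lemma pyGetD_idx (temp : List Int) (e : Nat) (h : e < temp.length) :
    PySem.List.pyGetD temp (if e + 1 < temp.length then (e : Int) + 1 else 0) 0 =
      (if h1 : e + 1 < temp.length then temp[e+1] else temp[0]) := by
  by_cases h1 : e + 1 < temp.length <;> simp only [h1, if_true, if_false, dif_pos, dif_neg, not_false_iff]
  · rw [show ((e : Int) + 1) = ((e + 1 : Nat) : Int) by push_cast; ring]
    rw [PySem.List.pyGetD_natCast]
    exact List.getD_eq_getElem _ _ h1
  · rw [show ((0 : Int)) = ((0 : Nat) : Int) by rfl, PySem.List.pyGetD_natCast]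
    exact List.getD_eq_getElem _ _ (by omega)

lemma scan_eq_aux (temp : List Int) : ∀ (k : Nat) (e : Nat), temp.length ≤ e + k →
    scanA temp (temp.drop e) e = scanB ((temp.zip (temp.drop 1 ++ temp.take 1)).drop e) e := by
  intro k
  induction k with
  | zero =>
    intro e he
    rw [List.drop_eq_nil_of_le (by omega), List.drop_eq_nil_of_le (by rw [zl_len]; omega)]
    rfl
  | succ k ih =>
    intro e he
    by_cases h : e < temp.length
    · have hz : e < (temp.zip (temp.drop 1 ++ temp.take 1)).length := by rw [zl_len]; omega
      rw [List.drop_eq_getElem_cons h, List.drop_eq_getElem_cons hz]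
      rw [List.getElem_zip]
      rw [partner_eq temp e h]
      show (match moeglicheKombinationen temp[e]
              (PySem.List.pyGetD temp (if e + 1 < temp.length then (e:Int) + 1 else 0) 0) with
            | some mk => some (e, mk)
            | none => scanA temp (temp.drop (e+1)) (e + 1)) = _
      rw [pyGetD_idx temp e h]
      cases hmk : moeglicheKombinationen temp[e]
          (if h1 : e + 1 < temp.length then temp[e+1] else temp[0]) with
      | some mk => simp [scanB, hmk]
      | none => simp only [scanB, hmk]; exact ih (e+1) (by omega)
    · rw [List.drop_eq_nil_of_le (by omega), List.drop_eq_nil_of_le (by rw [zl_len]; omega)]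
      rfl

lemma scan_eq' (temp : List Int) (e : Nat) :
    scanA temp (temp.drop e) e = scanB ((temp.zip (temp.drop 1 ++ temp.take 1)).drop e) e :=
  scan_eq_aux temp temp.length e (by omega)

lemma scanA_sound' (temp : List Int) : ∀ (k e0 : Nat) (e : Nat) (mk : Int), temp.length ≤ e0 + k →
    scanA temp (temp.drop e0) e0 = some (e, mk) →
    e0 ≤ e ∧ ∃ h : e < temp.length,
      moeglicheKombinationen temp[e]
        (PySem.List.pyGetD temp (if e + 1 < temp.length then (e : Int) + 1 else 0) 0) = some mk := by
  intro k
  induction k with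
  | zero =>
    intro e0 e mk he h
    rw [List.drop_eq_nil_of_le (by omega)] at h
    exact absurd h (by simp [scanA])
  | succ k ih =>
    intro e0 e mk he h
    by_cases hlt : e0 < temp.length
    · rw [List.drop_eq_getElem_cons hlt] at h
      revert h
      show (match moeglicheKombinationen temp[e0]
              (PySem.List.pyGetD temp (if e0 + 1 < temp.length then (e0:Int) + 1 else 0) 0) with
            | some mk => some (e0, mk)
            | none => scanA temp (temp.drop (e0+1)) (e0 + 1)) = some (e, mk) → _
      cases hmk : moeglicheKombinationen temp[e0]
          (PySem.List.pyGetD temp (if e0 + 1 < temp.length then (e0:Int) + 1 else 0) 0) with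
      | some mk' =>
        intro h
        simp only [Option.some.injEq, Prod.mk.injEq] at h
        obtain ⟨h1, h2⟩ := h
        subst h1; subst h2
        exact ⟨le_refl _, hlt, hmk⟩
      | none =>
        intro h
        obtain ⟨h1, h2⟩ := ih (e0 + 1) e mk (by omega) h
        exact ⟨by omega, h2⟩
    · rw [List.drop_eq_nil_of_le (by omega)] at h
      exact absurd h (by simp [scanA])

lemma scanA_two_le' (temp : List Int) (e : Nat) (mk : Int)
    (h : scanA temp temp 0 = some (e, mk)) : 2 ≤ temp.length := by
  have h' : scanA temp (temp.drop 0) 0 = some (e, mk) := by simpa using h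
  obtain ⟨-, hlt, hmk⟩ := scanA_sound' temp temp.length 0 e mk (by omega) h'
  by_contra hc
  have h1 : temp.length = 1 := by omega
  have he : e = 0 := by omega
  subst he
  rw [pyGetD_idx temp 0 hlt, dif_neg (by omega)] at hmk
  rw [mk_self] at hmk
  exact absurd hmk (by simp)


lemma loopB_nil' (fuel : Nat) : loopB fuel [] = [] := by
  cases fuel <;> rfl

lemma loopB_singleton' (fuel : Nat) (x : Int) : loopB fuel [x] = [x] := by
  cases fuel with
  | zero => rfl
  | succ f =>
    show loopB (f + 1) [x] = [x]
    unfold loopB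
    simp [PySem.List.slice, scanB, mk_self]

lemma merge_perm (temp : List Int) (e : Nat) (mk : Int)
    (h2 : 2 ≤ temp.length) (he : e < temp.length) :
    ((temp.set e mk).eraseIdx (if e + 1 < temp.length then e + 1 else 0)).Perm
      (mk :: (if e + 1 < temp.length then temp.take e ++ temp.drop (e + 2)
              else (temp.drop 1).take (e - 1))) := by
  have hset : temp.set e mk = temp.take e ++ mk :: temp.drop (e + 1) := by
    rw [List.set_eq_take_append_cons_drop, if_pos he]
  have hle : (temp.take e).length = e := by simp; omega
  by_cases h1 : e + 1 < temp.length
  · have hE : (temp.set e mk).eraseIdx (e + 1) =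
        temp.take e ++ [mk] ++ (temp.drop (e + 1)).tail := by
      rw [hset, List.eraseIdx_eq_take_drop_succ]
      rw [List.take_append, List.drop_append, hle]
      rw [List.take_take, min_eq_right (by omega)]
      rw [show e + 1 - e = 1 from by omega, show e + 1 + 1 - e = 2 from by omega]
      rw [List.drop_eq_nil_of_le (as := temp.take e) (by rw [hle]; omega)]
      rw [show (2 : Nat) = 1 + 1 from rfl, List.drop_succ_cons, List.drop_one]
      simp
    have hrest2 : temp.drop (e + 2) = (temp.drop (e + 1)).tail := by
      rw [← List.drop_one, List.drop_drop]
    rw [if_pos h1, if_pos h1, hE, hrest2]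
    have h3 := List.perm_middle (a := mk) (l₁ := temp.take e) (l₂ := (temp.drop (e + 1)).tail)
    simp [List.append_assoc]
  · have hY : temp.drop (e + 1) = [] := List.drop_eq_nil_of_le (by omega)
    have hE : (temp.set e mk).eraseIdx 0 = (temp.take e).tail ++ [mk] := by
      rw [hset, hY, List.eraseIdx_eq_take_drop_succ, List.take_zero, List.nil_append]
      rw [show (0 : Nat) + 1 = 1 from rfl, List.drop_append, hle]
      rw [show (1 : Nat) - e = 0 from by omega, List.drop_zero, List.drop_one]
    have htt : (temp.take e).tail = (temp.drop 1).take (e - 1) := by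
      rw [← List.drop_one, List.drop_take]
    rw [if_neg h1, if_neg h1, hE, htt]
    have h3 := List.perm_middle (a := mk) (l₁ := (temp.drop 1).take (e - 1)) (l₂ := ([] : List Int))
    simp

lemma main_eq' : ∀ (fuel : Nat) (v : List Int), v.length < fuel →
    goA fuel v =
      (let r := loopB fuel (PySem.List.sorted (v.filter (fun x => x != 0)) (fun x => x) false);
       if r = [] then [0] else r) := by
  intro fuel
  induction fuel with
  | zero => intro v hv; omega
  | succ f ih =>
    intro v hv
    simp only [goA, loopB]
    generalize hT : PySem.List.sorted (v.filter (fun x => x != 0)) (fun x => x) false = temp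
    have hlen : temp.length ≤ v.length := by
      rw [← hT, PySem.List.length_sorted]; exact List.length_filter_le _ _
    have hsl : PySem.List.slice temp (some 1) none ++ PySem.List.slice temp none (some 1)
        = temp.drop 1 ++ temp.take 1 := by
      rw [show (some (1:Int)) = some ((1:Nat) : Int) by norm_num]
      rw [PySem.List.slice_from_natCast, PySem.List.slice_to_natCast]
    have hscan : scanB (temp.zip (temp.drop 1 ++ temp.take 1)) 0 = scanA temp temp 0 := by
      have := scan_eq' temp 0
      simpa using this.symm
    rw [hsl, hscan]
    cases hA : scanA temp temp 0 with
    | none =>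
      by_cases hn : temp = []
      · simp [hn]
      · have : temp.length ≠ 0 := by simpa using hn
        simp [hn, this]
    | some em =>
      obtain ⟨e, mk⟩ := em
      dsimp only
      have h2 : 2 ≤ temp.length := scanA_two_le' temp e mk hA
      have hsound := scanA_sound' temp temp.length 0 e mk (by omega) (by simpa using hA)
      obtain ⟨-, he, -⟩ := hsound
      have hi : (if e + 1 < temp.length then e + 1 else 0) < temp.length := by
        split <;> omega
      have ht2len : ((temp.set e mk).eraseIdx (if e + 1 < temp.length then e + 1 else 0)).length
          = temp.length - 1 := by
        rw [List.length_eraseIdx]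
        simp [hi]
      have hrest : (if e + 1 < temp.length
            then PySem.List.slice temp none (some (e : Int)) ++
                 PySem.List.slice temp (some ((e : Int) + 2)) none
            else PySem.List.slice temp (some 1) (some (e : Int)))
          = (if e + 1 < temp.length then temp.take e ++ temp.drop (e + 2)
             else (temp.drop 1).take (e - 1)) := by
        by_cases h1 : e + 1 < temp.length
        · rw [if_pos h1, if_pos h1]
          rw [PySem.List.slice_to_natCast]
          rw [show ((e : Int) + 2) = ((e + 2 : Nat) : Int) by push_cast; ring]
          rw [PySem.List.slice_from_natCast]
        · rw [if_neg h1, if_neg h1]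
          rw [show (some (1:Int)) = some ((1:Nat) : Int) by norm_num]
          rw [PySem.List.slice_natCast]
      simp only [hrest]
      have hperm := merge_perm temp e mk h2 he
      have hsort : PySem.List.sorted
            ((mk :: (if e + 1 < temp.length then temp.take e ++ temp.drop (e + 2)
                     else (temp.drop 1).take (e - 1))).filter (fun x => x != 0)) (fun x => x) false
          = PySem.List.sorted
            (((temp.set e mk).eraseIdx (if e + 1 < temp.length then e + 1 else 0)).filter
              (fun x => x != 0)) (fun x => x) false := by
        exact PySem.List.sorted_eq_sorted_of_perm _ _ _ (fun a b h => h) ((hperm.filter _).symm)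
      simp only [hsort]
      set t2 := (temp.set e mk).eraseIdx (if e + 1 < temp.length then e + 1 else 0) with ht2
      by_cases hgt : t2.length > 1
      · rw [if_pos hgt]
        rw [ih t2 (by omega)]
        by_cases hr : loopB f (PySem.List.sorted (t2.filter (fun x => x != 0)) (fun x => x) false) = []
        · simp [hr]
        · simp [hr, List.length_eq_zero_iff]
      · have h1 : t2.length = 1 := by omega
        rw [if_neg hgt, if_pos h1]
        obtain ⟨x, hx⟩ := List.length_eq_one_iff.mp h1
        rw [hx]
        by_cases hx0 : x = 0
        · subst hx0
          have hf : List.filter (fun x => x != 0) [(0:Int)] = [] := by simp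
          simp only [hf]
          have hs : PySem.List.sorted ([] : List Int) (fun x => x) false = [] := rfl
          simp only [hs, loopB_nil']
          simp
        · have hf : List.filter (fun y => y != 0) [x] = [x] := by simp [hx0]
          simp only [hf]
          have hs : PySem.List.sorted [x] (fun x : Int => x) false = [x] :=
            PySem.List.sorted_eq_self_of_pairwise _ _ (List.pairwise_singleton _ _)
          simp only [hs, loopB_singleton']
          simp

-- ===== VERDICT (by name: the statement is the Claim_ definition above) =====
theorem vektorEinkuerzen_spec : Claim_equal_vektorEinkuerzen := by
  intro v _
  show goA (v.length + 1) v = vektorEinkuerzen_alt v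
  rw [main_eq' (v.length + 1) v (by omega)]
  rfl
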